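-- pv_equiv track=rewrite | github.com/MatejCreator/work_folder | Sorting Algo Race.py | log_n
-- ===== SOURCE A (Python) =====
-- from typing import Any, Generator
-- from math import log2, factorial
--
-- def log_n(n: int) -> Generator[list[int], None, None]:
--     arr = [1 for _ in range(n)]
--     yield arr[:]
--
--     for i in range(1, len(arr)):
--         arr[i] = int(log2(i + 1))
--         for j in range(i+1, len(arr)):
--             arr[j] = arr[i]
--         yield arr[:]
-- ===== SOURCE B (Python) =====
-- def log_n(n: int):
--     # Closed form: cell j of frame i is floor(log2(max(min(i, j), 1) + 1)), so the
--     # frame changes only when i+1 reaches a power of two (its bit_length grows);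
--     # compute each distinct frame once from the formula and otherwise copy it.
--     prev = None
--     for i in range(max(n, 1)):
--         if (i + 1).bit_length() > i.bit_length():
--             prev = [(max(min(i, j), 1) + 1).bit_length() - 1 for j in range(n)]
--         yield list(prev)
-- ===== Notes on version B (the rewrite author's own statement) =====
-- stated objective: alternative
-- what changed: B replaces A's in-place array mutation with nested fill loops by a closed-form per-cell formula cell(i,j)=floor(log2(max(min(i,j),1)+1)) computed with integer bit_length, and exploits that the frame changes only when i+1 reaches a power of two, so each distinct frame is built once and otherwise copied.
import Mathlib
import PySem

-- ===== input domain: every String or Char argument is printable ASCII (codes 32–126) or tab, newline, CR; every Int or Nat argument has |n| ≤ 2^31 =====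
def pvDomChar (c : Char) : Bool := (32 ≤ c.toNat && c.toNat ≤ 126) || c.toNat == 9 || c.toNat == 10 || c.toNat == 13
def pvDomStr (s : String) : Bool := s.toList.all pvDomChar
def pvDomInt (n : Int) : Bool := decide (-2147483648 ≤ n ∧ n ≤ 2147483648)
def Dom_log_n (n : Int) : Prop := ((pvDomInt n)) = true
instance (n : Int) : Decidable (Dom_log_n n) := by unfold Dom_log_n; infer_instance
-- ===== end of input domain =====

-- B replaces A's in-place mutation with nested fill loops by a closed-form per-cell
-- formula (cell (i,j) = floor(log2(max(min(i,j),1)+1)) via integer bit_length);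
-- objective: simpler. Both generators are materialised as the list of yielded frames.

-- ===== PORT A =====
-- int(log2(m)): exact for 1 ≤ m ≤ 2^31 + 1 (float log2 of such an integer never
-- rounds across an integer boundary, so truncation equals floor of log2)
def pyIntLog2 (m : Int) : Int := (Nat.log2 m.toNat : Int)

-- A Python list is a dynamic array, so arr is ported as Array Int (O(1) in-place writes,
-- as in Python); every index written/read is in range in this program, arr[:] is arr.toList
def log_n (n : Int) : List (List Int) :=
  let arr : Array Int := ((PySem.List.pyRange 0 n 1).map (fun _ => (1 : Int))).toArray
  -- yield arr[:], then for i in range(1, len(arr)): …, collecting every yielded frame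
  ((PySem.List.pyRange 1 (arr.size : Int) 1).foldl
    (fun (st : List (List Int) × Array Int) i =>
      let acc := st.1
      let arr := st.2
      let arr := arr.setIfInBounds i.toNat (pyIntLog2 (i + 1))   -- arr[i] = int(log2(i+1))
      let arr := (PySem.List.pyRange (i + 1) (arr.size : Int) 1).foldl
        (fun (a : Array Int) j => a.setIfInBounds j.toNat (a.getD i.toNat 0)) arr
          -- arr[j] = arr[i]  (1 ≤ i < j < len arr always)
      (acc ++ [arr.toList], arr))
    ([arr.toList], arr)).1

-- ===== PORT B =====
-- m.bit_length(): hand port, exact for m ≥ 0 (0 for m = 0, Nat.log2 m + 1 otherwise)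
def pyBitLength (m : Int) : Int := if m ≤ 0 then 0 else (Nat.log2 m.toNat : Int) + 1

def log_n_alt (n : Int) : List (List Int) :=
  -- prev = None; for i in range(max(n, 1)): if (i+1).bit_length() > i.bit_length():
  --   prev = [(max(min(i,j),1)+1).bit_length() - 1 for j in range(n)]; yield list(prev)
  -- (the trigger fires at i = 0, so the None/[] start value is never yielded)
  ((PySem.List.pyRange 0 (max n 1) 1).foldl
    (fun (st : List (List Int) × List Int) i =>
      let prev := if pyBitLength (i + 1) > pyBitLength i
        then (PySem.List.pyRange 0 n 1).map (fun j => pyBitLength (max (min i j) 1 + 1) - 1)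
        else st.2
      (st.1 ++ [prev], prev))
    ([], [])).1

-- ===== PRECONDITION & SPEC =====
def Spec_log_n (n : Int) (out : List (List Int)) : Prop := out = log_n_alt n
instance (n : Int) (out : List (List Int)) : Decidable (Spec_log_n n out) := by unfold Spec_log_n; infer_instance

-- ===== CLAIM (what is proved, stated in full; the proofs are below) =====
def Claim_equal_log_n : Prop := ∀ (n : Int), Dom_log_n n → Spec_log_n n (log_n n)

-- ===== LEMMAS AND PROOFS =====

-- proof-only abbreviations: B's cell formula, the final row of A, one A-snapshot,
-- the list of the first snapshots
def cellB (i j : Int) : Int := (Nat.log2 (max (min i j) 1 + 1).toNat : Int)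

theorem cellB_eq (i j : Int) : pyBitLength (max (min i j) 1 + 1) - 1 = cellB i j := by
  rw [pyBitLength, if_neg (by omega : ¬ (max (min i j) 1 + 1 ≤ 0)), cellB]
  ring

-- the row B computes at index i
def rowB (n i : Int) : List Int := (PySem.List.pyRange 0 n 1).map (fun j => cellB i j)

-- within a power-of-two block consecutive rows coincide
theorem rowB_stable (n : Int) (k : Nat) (h1 : 1 ≤ k)
    (hlog : Nat.log2 (k + 1) = Nat.log2 k) :
    rowB n ((k : Nat) : Int) = rowB n (((k : Nat) : Int) - 1) := by
  have hk2 : 2 ≤ k := by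
    rcases Nat.lt_or_ge k 2 with h | h
    · interval_cases k
      exact absurd hlog (by decide)
    · exact h
  apply List.map_congr_left
  intro j hj
  have hjm := PySem.List.mem_pyRange_one.mp hj
  rcases le_or_gt j (((k : Nat) : Int) - 1) with hle | hgt
  · -- j ≤ k-1: both minima are j
    rw [cellB, cellB, min_eq_right (by omega), min_eq_right hle]
  · -- j ≥ k: minima are k and k-1; the logs agree by hlog
    rw [cellB, cellB, min_eq_left (by omega), min_eq_left (by omega),
      max_eq_left (by push_cast; omega), max_eq_left (by push_cast; omega)]
    congr 1
    rw [show (((k : Nat) : Int) + 1).toNat = k + 1 by omega,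
      show (((k : Nat) : Int) - 1 + 1).toNat = k by omega]
    exact hlog

def finalRow (n : Int) : List Int :=
  1 :: (PySem.List.pyRange 1 n 1).map (fun k => pyIntLog2 (k + 1))

def frameF (n i : Int) : List Int :=
  PySem.List.slice (finalRow n) none (some (i + 1)) ++
    List.replicate (n - 1 - i).toNat (PySem.List.pyGetD (finalRow n) i 0)

def framesF (n T : Int) : List (List Int) :=
  List.replicate n.toNat 1 :: (PySem.List.pyRange 1 T 1).map (frameF n)

theorem finalRow_length (n : Int) (hn : 1 ≤ n) : (finalRow n).length = n.toNat := by
  simp [finalRow, PySem.List.length_pyRange_one]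
  omega

theorem finalRow_get (n k : Int) (h1 : 1 ≤ k) (h2 : k < n) :
    PySem.List.pyGetD (finalRow n) k 0 = pyIntLog2 (k + 1) := by
  obtain ⟨m, hm⟩ : ∃ m : Nat, k = (m : Int) + 1 := ⟨(k - 1).toNat, by omega⟩
  subst hm
  rw [show ((m : Int) + 1) = ((m + 1 : Nat) : Int) by push_cast; ring]
  rw [finalRow, PySem.List.pyGetD_natCast]
  rw [List.getD_cons_succ]
  rw [← PySem.List.pyGetD_natCast,
    PySem.List.pyGetD_map_pyRange_one (fun k => pyIntLog2 (k + 1)) 1 n m 0 (by omega)]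
  norm_num
  ring_nf

theorem frameF_take (n : Int) (t : Nat) :
    frameF n (t : Int) = (finalRow n).take (t + 1) ++
      List.replicate ((n - 1 - (t : Int)).toNat) (PySem.List.pyGetD (finalRow n) (t : Int) 0) := by
  rw [frameF, PySem.List.slice_to _ (by omega)]
  rw [show ((t : Int) + 1).toNat = t + 1 by omega]

theorem frameF_zero (n : Int) (hn : 1 ≤ n) : frameF n 0 = List.replicate n.toNat 1 := by
  have h := frameF_take n 0
  norm_num at h
  rw [h, finalRow]
  rw [PySem.List.pyGetD_zero_cons]
  rw [show n.toNat = (n - 1).toNat + 1 by omega, List.replicate_succ]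
  simp

-- setting exactly at the boundary of an append
theorem set_append_len (P l : List Int) (v : Int) :
    (P ++ l).set P.length v = P ++ l.set 0 v := by
  induction P with
  | nil => rfl
  | cons a P ih => simp [ih]

theorem getElem?_take_lt (F : List Int) (m k : Nat) (h : k < m) : (F.take m)[k]? = F[k]? := by
  induction F generalizing m k with
  | nil => simp
  | cons a F ih =>
    cases m with
    | zero => omega
    | succ m =>
      cases k with
      | zero => simp
      | succ k => simp [ih m k (by omega)]

theorem take_succ_eq (F : List Int) (k : Nat) (h : k < F.length) :
    F.take (k + 1) = F.take k ++ [F[k]] := by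
  induction F generalizing k with
  | nil => simp at h
  | cons a F ih =>
    cases k with
    | zero => simp
    | succ k => simpa using ih k (by simp at h; omega)

-- the inner fill loop: indices pre.length … pre.length+t-1 of pre ++ replicate t c are
-- overwritten one by one with the value read at the fixed index k inside pre
theorem fill_loop (k : Nat) (v c : Int) :
    ∀ (t : Nat) (pre : List Int), k < pre.length → pre[k]? = some v →
      (PySem.List.pyRange (pre.length : Int) ((pre.length : Int) + (t : Int)) 1).foldl
        (fun (a : List Int) j => PySem.List.pySetD a j (PySem.List.pyGetD a (k : Int) 0))
        (pre ++ List.replicate t c)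
      = pre ++ List.replicate t v := by
  intro t
  induction t with
  | zero =>
    intro pre h1 h2
    rw [PySem.List.pyRange_one_eq_nil (by simp)]
    simp
  | succ t ih =>
    intro pre h1 h2
    rw [PySem.List.pyRange_one_cons (by push_cast; omega)]
    simp only [List.foldl_cons]
    have hget : PySem.List.pyGetD (pre ++ List.replicate (t + 1) c) (k : Int) 0 = v := by
      rw [PySem.List.pyGetD_natCast, List.getD_eq_getElem?_getD,
        List.getElem?_append_left h1, h2]
      rfl
    have hset : PySem.List.pySetD (pre ++ List.replicate (t + 1) c) ((pre.length : Nat) : Int) v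
        = (pre ++ [v]) ++ List.replicate t c := by
      rw [PySem.List.pySetD_natCast, List.replicate_succ, set_append_len]
      simp
    rw [hget, hset]
    have e1 : ((pre.length : Int) + 1) = (((pre ++ [v]).length : Nat) : Int) := by
      simp
    have e2 : (pre.length : Int) + ((t + 1 : Nat) : Int)
        = (((pre ++ [v]).length : Nat) : Int) + (t : Int) := by
      push_cast
      simp
      ring
    rw [e1, e2, ih (pre ++ [v]) (by simp; omega) (by rw [List.getElem?_append_left h1, h2])]
    simp [List.replicate_succ]

-- one outer iteration turns snapshot t into snapshot t+1
theorem step_frame (n : Int) (t : Nat) (hn : (t : Int) + 1 ≤ n - 1) :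
    (PySem.List.pyRange (((t + 1 : Nat) : Int) + 1)
        (((PySem.List.pySetD (frameF n (t : Int)) ((t + 1 : Nat) : Int)
            (pyIntLog2 (((t + 1 : Nat) : Int) + 1))).length : Int)) 1).foldl
      (fun (a : List Int) j => PySem.List.pySetD a j (PySem.List.pyGetD a ((t + 1 : Nat) : Int) 0))
      (PySem.List.pySetD (frameF n (t : Int)) ((t + 1 : Nat) : Int)
        (pyIntLog2 (((t + 1 : Nat) : Int) + 1)))
    = frameF n ((t + 1 : Nat) : Int) := by
  have hn1 : 1 ≤ n := by omega
  have hF : (finalRow n).length = n.toNat := finalRow_length n hn1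
  have hw : PySem.List.pyGetD (finalRow n) ((t + 1 : Nat) : Int) 0
      = pyIntLog2 (((t + 1 : Nat) : Int) + 1) :=
    finalRow_get n _ (by push_cast; omega) (by push_cast; omega)
  have hlt : t + 1 < (finalRow n).length := by omega
  have hww : (finalRow n)[t + 1] = pyIntLog2 (((t + 1 : Nat) : Int) + 1) := by
    rw [← List.getD_eq_getElem _ 0 hlt, ← PySem.List.pyGetD_natCast]
    exact hw
  have hP : ((finalRow n).take (t + 1)).length = t + 1 := by simp; omega
  have hP2 : ((finalRow n).take (t + 2)).length = t + 2 := by simp; omega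
  have hsz : (n - 1 - (t : Int)).toNat = (n - 2 - (t : Int)).toNat + 1 := by omega
  have hset : PySem.List.pySetD (frameF n (t : Int)) ((t + 1 : Nat) : Int)
        (pyIntLog2 (((t + 1 : Nat) : Int) + 1))
      = (finalRow n).take (t + 2) ++
          List.replicate ((n - 2 - (t : Int)).toNat) (PySem.List.pyGetD (finalRow n) (t : Int) 0) := by
    have hstep := set_append_len ((finalRow n).take (t + 1))
      (PySem.List.pyGetD (finalRow n) (t : Int) 0 ::
        List.replicate ((n - 2 - (t : Int)).toNat) (PySem.List.pyGetD (finalRow n) (t : Int) 0))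
      (pyIntLog2 (((t + 1 : Nat) : Int) + 1))
    rw [hP] at hstep
    rw [frameF_take, PySem.List.pySetD_natCast, hsz, List.replicate_succ, hstep,
      List.set_cons_zero, take_succ_eq (finalRow n) (t + 1) hlt, hww]
    simp
  rw [hset]
  have hlen : (((finalRow n).take (t + 2) ++
      List.replicate ((n - 2 - (t : Int)).toNat) (PySem.List.pyGetD (finalRow n) (t : Int) 0)).length : Int)
      = ((((finalRow n).take (t + 2)).length : Nat) : Int) + ((n - 2 - (t : Int)).toNat : Int) := by
    simp
  rw [hlen]
  rw [show (((t + 1 : Nat) : Int) + 1) = ((((finalRow n).take (t + 2)).length : Nat) : Int) by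
    rw [hP2]; push_cast; ring]
  rw [fill_loop (t + 1) (pyIntLog2 (((t + 1 : Nat) : Int) + 1))
      (PySem.List.pyGetD (finalRow n) (t : Int) 0) ((n - 2 - (t : Int)).toNat)
      ((finalRow n).take (t + 2)) (by omega)
      (by rw [getElem?_take_lt _ _ _ (by omega), List.getElem?_eq_getElem hlt, hww])]
  rw [frameF_take n (t + 1)]
  rw [hw]
  rw [show (n - 1 - ((t + 1 : Nat) : Int)).toNat = (n - 2 - (t : Int)).toNat by push_cast; omega]

theorem framesF_succ (n T : Int) (hT : 1 ≤ T) :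
    framesF n (T + 1) = framesF n T ++ [frameF n T] := by
  rw [framesF, framesF, PySem.List.pyRange_one_succ_right hT, List.map_append]
  simp

-- the outer loop after t iterations: all snapshots so far, and the current array
theorem outer_loop (n : Int) (hn : 1 ≤ n) :
    ∀ (t : Nat), (t : Int) ≤ n - 1 →
      (PySem.List.pyRange 1 (1 + (t : Int)) 1).foldl
        (fun (st : List (List Int) × List Int) i =>
          let acc := st.1
          let arr := st.2
          let arr := PySem.List.pySetD arr i (pyIntLog2 (i + 1))
          let arr := (PySem.List.pyRange (i + 1) (arr.length : Int) 1).foldl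
            (fun (a : List Int) j => PySem.List.pySetD a j (PySem.List.pyGetD a i 0)) arr
          (acc ++ [arr], arr))
        ([List.replicate n.toNat 1], List.replicate n.toNat 1)
      = (framesF n (1 + (t : Int)), frameF n (t : Int)) := by
  intro t
  induction t with
  | zero =>
    intro _
    rw [show (1 + ((0 : Nat) : Int)) = 1 by norm_num]
    rw [PySem.List.pyRange_one_eq_nil (le_refl 1)]
    simp [framesF, PySem.List.pyRange_one_eq_nil (le_refl (1 : Int)), frameF_zero n hn]
  | succ t ih =>
    intro ht
    have ht' : (t : Int) ≤ n - 1 := by push_cast at ht ⊢; omega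
    have hsplit : PySem.List.pyRange 1 (1 + ((t + 1 : Nat) : Int)) 1
        = PySem.List.pyRange 1 (1 + (t : Int)) 1 ++ [1 + (t : Int)] := by
      rw [show (1 + ((t + 1 : Nat) : Int)) = (1 + (t : Int)) + 1 by push_cast; ring]
      exact PySem.List.pyRange_one_succ_right (by omega)
    rw [hsplit, List.foldl_append, ih ht']
    simp only [List.foldl_cons, List.foldl_nil]
    rw [show (1 + (t : Int)) = ((t + 1 : Nat) : Int) by push_cast; ring]
    rw [step_frame n t (by omega)]
    rw [show (1 + ((t + 1 : Nat) : Int)) = ((t + 1 : Nat) : Int) + 1 by ring]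
    rw [framesF_succ n _ (by push_cast; omega)]

-- the Array-state port of A computes, snapshot for snapshot, what the same loops compute
-- on a List state: inner fill loop …
theorem inner_sim (i : Int) (hi : 0 ≤ i) :
    ∀ (r : List Int), (∀ j ∈ r, 0 ≤ j) →
    ∀ (a : Array Int) (l : List Int), a.toList = l →
      (r.foldl (fun (x : Array Int) j => x.setIfInBounds j.toNat (x.getD i.toNat 0)) a).toList
      = r.foldl (fun (x : List Int) j => PySem.List.pySetD x j (PySem.List.pyGetD x i 0)) l := by
  intro r
  induction r with
  | nil => intro _ a l h; simpa using h
  | cons j r ih =>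
    intro hr a l h
    have hj : 0 ≤ j := hr j (by simp)
    simp only [List.foldl_cons]
    apply ih (fun x hx => hr x (by simp [hx]))
    rw [Array.toList_setIfInBounds, h, PySem.List.pySetD_of_nonneg _ _ hj]
    congr 1
    rw [Array.getD_eq_getD_getElem?, ← Array.getElem?_toList, h, ← List.getD_eq_getElem?_getD,
      ← PySem.List.pyGetD_natCast l i.toNat 0, Int.toNat_of_nonneg hi]

-- … and outer loop (first component: the collected snapshots; second: the working array)
theorem outer_sim :
    ∀ (r : List Int), (∀ j ∈ r, 0 ≤ j) →
    ∀ (s : List (List Int) × Array Int) (t : List (List Int) × List Int),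
      s.1 = t.1 → s.2.toList = t.2 →
      ((r.foldl (fun (st : List (List Int) × Array Int) i =>
          let acc := st.1
          let arr := st.2
          let arr := arr.setIfInBounds i.toNat (pyIntLog2 (i + 1))
          let arr := (PySem.List.pyRange (i + 1) (arr.size : Int) 1).foldl
            (fun (a : Array Int) j => a.setIfInBounds j.toNat (a.getD i.toNat 0)) arr
          (acc ++ [arr.toList], arr)) s).1
        = (r.foldl (fun (st : List (List Int) × List Int) i =>
            let acc := st.1
            let arr := st.2
            let arr := PySem.List.pySetD arr i (pyIntLog2 (i + 1))
            let arr := (PySem.List.pyRange (i + 1) (arr.length : Int) 1).foldl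
              (fun (a : List Int) j => PySem.List.pySetD a j (PySem.List.pyGetD a i 0)) arr
            (acc ++ [arr], arr)) t).1)
      ∧ ((r.foldl (fun (st : List (List Int) × Array Int) i =>
          let acc := st.1
          let arr := st.2
          let arr := arr.setIfInBounds i.toNat (pyIntLog2 (i + 1))
          let arr := (PySem.List.pyRange (i + 1) (arr.size : Int) 1).foldl
            (fun (a : Array Int) j => a.setIfInBounds j.toNat (a.getD i.toNat 0)) arr
          (acc ++ [arr.toList], arr)) s).2.toList
        = (r.foldl (fun (st : List (List Int) × List Int) i =>
            let acc := st.1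
            let arr := st.2
            let arr := PySem.List.pySetD arr i (pyIntLog2 (i + 1))
            let arr := (PySem.List.pyRange (i + 1) (arr.length : Int) 1).foldl
              (fun (a : List Int) j => PySem.List.pySetD a j (PySem.List.pyGetD a i 0)) arr
            (acc ++ [arr], arr)) t).2) := by
  intro r
  induction r with
  | nil => intro _ s t h1 h2; exact ⟨h1, h2⟩
  | cons i r ih =>
    intro hr s t h1 h2
    have hi : 0 ≤ i := hr i (by simp)
    simp only [List.foldl_cons]
    have harr1 : (s.2.setIfInBounds i.toNat (pyIntLog2 (i + 1))).toList
        = PySem.List.pySetD t.2 i (pyIntLog2 (i + 1)) := by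
      rw [Array.toList_setIfInBounds, h2, PySem.List.pySetD_of_nonneg _ _ hi]
    have hsize : ((s.2.setIfInBounds i.toNat (pyIntLog2 (i + 1))).size : Int)
        = ((PySem.List.pySetD t.2 i (pyIntLog2 (i + 1))).length : Int) := by
      rw [← Array.length_toList, harr1]
    have hinner : ((PySem.List.pyRange (i + 1)
          ((s.2.setIfInBounds i.toNat (pyIntLog2 (i + 1))).size : Int)).foldl
          (fun (a : Array Int) j => a.setIfInBounds j.toNat (a.getD i.toNat 0))
          (s.2.setIfInBounds i.toNat (pyIntLog2 (i + 1)))).toList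
        = (PySem.List.pyRange (i + 1)
            ((PySem.List.pySetD t.2 i (pyIntLog2 (i + 1))).length : Int)).foldl
            (fun (a : List Int) j => PySem.List.pySetD a j (PySem.List.pyGetD a i 0))
            (PySem.List.pySetD t.2 i (pyIntLog2 (i + 1))) := by
      rw [hsize]
      exact inner_sim i hi _
        (fun j hj => by have := PySem.List.mem_pyRange_one.mp hj; omega) _ _ harr1
    exact ih (fun x hx => hr x (by simp [hx])) _ _ (by rw [h1, hinner]) hinner

theorem init_arr (n : Int) :
    (PySem.List.pyRange 0 n 1).map (fun _ => (1 : Int)) = List.replicate n.toNat 1 := by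
  have h : ∀ (l : List Int), l.map (fun _ => (1 : Int)) = List.replicate l.length 1 := by
    intro l
    induction l with
    | nil => rfl
    | cons a l ih => simp [ih, List.replicate_succ]
  rw [h, PySem.List.length_pyRange_one]
  norm_num

-- ===== new B-side lemmas: the snapshot list equals B's closed-form frames =====

theorem finalRow_getElem (n : Int) (k : Nat) (h1 : 1 ≤ k) (h2 : (k : Int) < n)
    (hk : k < (finalRow n).length) :
    (finalRow n)[k] = pyIntLog2 ((k : Int) + 1) := by
  rw [← List.getD_eq_getElem _ 0 hk, ← PySem.List.pyGetD_natCast]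
  exact finalRow_get n k (by omega) h2

-- frame i of A (1 ≤ i < n) is pointwise B's closed-form row
theorem frameF_eq_cellB (n : Int) (t : Nat) (h1 : 1 ≤ t) (h2 : (t : Int) < n) :
    frameF n (t : Int) = (PySem.List.pyRange 0 n 1).map (fun j => cellB (t : Int) j) := by
  have hn1 : 1 ≤ n := by omega
  have hF : (finalRow n).length = n.toNat := finalRow_length n hn1
  rw [frameF_take]
  apply List.ext_getElem
  · simp [PySem.List.length_pyRange_one, hF]
    omega
  · intro k hkl hkr
    have hk : k < n.toNat := by
      simpa [PySem.List.length_pyRange_one] using hkr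
    rw [List.getElem_map, PySem.List.getElem_pyRange_one]
    simp only [zero_add]
    by_cases hcase : k < t + 1
    · rw [List.getElem_append_left (by simp [hF]; omega)]
      rw [List.getElem_take]
      cases Nat.eq_zero_or_pos k with
      | inl h0 =>
        subst h0
        have hmin : min ((t : Nat) : Int) ((0 : Nat) : Int) = 0 := by
          rw [min_eq_right]; push_cast; omega
        rw [cellB, hmin]
        simp [finalRow]
      | inr hpos =>
        rw [finalRow_getElem n k hpos (by omega) (by omega)]
        have hmin : min ((t : Nat) : Int) ((k : Nat) : Int) = (k : Int) := by
          rw [min_eq_right]; push_cast; omega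
        have hmax : max ((k : Nat) : Int) (1 : Int) = (k : Int) := by
          rw [max_eq_left]; push_cast; omega
        rw [cellB, hmin, hmax, pyIntLog2]
    · rw [List.getElem_append_right (by simp [hF]; omega)]
      rw [List.getElem_replicate]
      rw [finalRow_get n (t : Int) (by push_cast; omega) h2]
      have hmin : min ((t : Nat) : Int) ((k : Nat) : Int) = (t : Int) := by
        rw [min_eq_left]; push_cast; omega
      have hmax : max ((t : Nat) : Int) (1 : Int) = (t : Int) := by
        rw [max_eq_left]; push_cast; omega
      rw [cellB, hmin, hmax, pyIntLog2]

-- B's frame 0 is the all-ones row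
theorem cellB_zero (j : Int) (h : 0 ≤ j) : cellB 0 j = 1 := by
  rw [cellB, min_eq_left h]
  decide

theorem cellB_zero_row (n : Int) :
    (PySem.List.pyRange 0 n 1).map (fun j => cellB 0 j) = List.replicate n.toNat 1 := by
  rw [List.map_congr_left (g := fun _ => (1 : Int)) (fun j hj => by
    have hm := PySem.List.mem_pyRange_one.mp hj
    exact cellB_zero j (by omega))]
  exact init_arr n

-- the comprehension inside B's branch is the row of cells
theorem rowExpr_eq (n i : Int) :
    (PySem.List.pyRange 0 n 1).map (fun j => pyBitLength (max (min i j) 1 + 1) - 1)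
      = rowB n i :=
  List.map_congr_left (fun j _ => cellB_eq i j)

-- B's fold: the accumulated frames are the rows, the carried row is the last one
theorem foldB (n : Int) : ∀ (m : Nat), 1 ≤ m →
    ((PySem.List.pyRange 0 (m : Int) 1).foldl
      (fun (st : List (List Int) × List Int) i =>
        let prev := if pyBitLength (i + 1) > pyBitLength i
          then (PySem.List.pyRange 0 n 1).map (fun j => pyBitLength (max (min i j) 1 + 1) - 1)
          else st.2
        (st.1 ++ [prev], prev))
      ([], []))
    = ((PySem.List.pyRange 0 (m : Int) 1).map (rowB n), rowB n ((m : Int) - 1)) := by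
  intro m
  induction m with
  | zero => omega
  | succ m ih =>
    intro _
    rcases Nat.eq_zero_or_pos m with h0 | hpos
    · subst h0
      rw [show (((1 : Nat) : Int)) = (1 : Int) by norm_num]
      rw [PySem.List.pyRange_one_cons (by norm_num : (0 : Int) < 1)]
      rw [PySem.List.pyRange_one_eq_nil (by norm_num : (1 : Int) ≤ 0 + 1)]
      simp only [List.foldl_cons, List.foldl_nil, List.map_cons, List.map_nil]
      rw [if_pos (by decide : pyBitLength (0 + 1) > pyBitLength 0)]
      rw [rowExpr_eq]
      norm_num
    · rw [show (((m + 1 : Nat)) : Int) = ((m : Int)) + 1 by push_cast; ring]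
      rw [PySem.List.pyRange_one_succ_right (by push_cast; omega), List.foldl_append,
        ih hpos, List.map_append]
      simp only [List.foldl_cons, List.foldl_nil, List.map_cons, List.map_nil]
      rw [rowExpr_eq]
      by_cases htr : pyBitLength ((m : Int) + 1) > pyBitLength (m : Int)
      · rw [if_pos htr]
        norm_num
      · rw [if_neg htr]
        have hlog : Nat.log2 (m + 1) = Nat.log2 m := by
          rw [pyBitLength, pyBitLength, if_neg (by push_cast; omega),
            if_neg (by push_cast; omega)] at htr
          have h1 : Nat.log2 (((m : Int) + 1).toNat) ≤ Nat.log2 (((m : Int)).toNat) := by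
            omega
          rw [show ((m : Int) + 1).toNat = m + 1 by omega,
            show ((m : Int)).toNat = m by omega] at h1
          have h2 : Nat.log2 m ≤ Nat.log2 (m + 1) := by
            rw [Nat.log2_eq_log_two, Nat.log2_eq_log_two]
            exact Nat.log_mono_right (by omega)
          omega
        have hst := rowB_stable n m hpos hlog
        simp only [add_sub_cancel_right]
        rw [hst]

-- B's result is the row at each index
theorem alt_eq_map (n : Int) :
    log_n_alt n = (PySem.List.pyRange 0 (max n 1) 1).map (rowB n) := by
  rw [log_n_alt]
  rw [show (max n 1) = (((max n 1).toNat : Nat) : Int) by omega]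
  rw [foldB n (max n 1).toNat (by omega)]

-- splitting off the head of a map over range(0, n) without touching inner ranges
theorem map_head_split {A : Type} (f : Int → A) (n : Int) (h : 0 < n) :
    (PySem.List.pyRange 0 n 1).map f = f 0 :: (PySem.List.pyRange 1 n 1).map f := by
  rw [PySem.List.pyRange_one_cons h, List.map_cons]
  norm_num

theorem framesF_eq_alt (n : Int) (hn : 1 ≤ n) : framesF n n = log_n_alt n := by
  rw [alt_eq_map, framesF]
  rw [max_eq_left (by omega : (1 : Int) ≤ n)]
  rw [map_head_split (rowB n) n (by omega)]
  congr 1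
  · exact (cellB_zero_row n).symm
  · symm
    apply List.map_congr_left
    intro i hi
    have hm := PySem.List.mem_pyRange_one.mp hi
    obtain ⟨t, rfl⟩ : ∃ t : Nat, i = (t : Int) := ⟨i.toNat, by omega⟩
    exact (frameF_eq_cellB n t (by omega) (by omega)).symm

-- ===== VERDICT (by name: the statement is the Claim_ definition above) =====
theorem log_n_spec : Claim_equal_log_n := by
  intro n _
  unfold Spec_log_n log_n
  simp only [init_arr, List.size_toArray, List.length_replicate]
  rw [(outer_sim (PySem.List.pyRange 1 ((n.toNat : Nat) : Int))
      (fun j hj => by have := PySem.List.mem_pyRange_one.mp hj; omega)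
      ([List.replicate n.toNat 1], (List.replicate n.toNat 1).toArray)
      ([List.replicate n.toNat 1], List.replicate n.toNat 1)
      rfl (by simp)).1]
  by_cases hn : 1 ≤ n
  · have h := outer_loop n hn (n - 1).toNat (by omega)
    rw [show (1 + (((n - 1).toNat : Nat) : Int)) = n by omega] at h
    rw [show ((n.toNat : Nat) : Int) = n by omega]
    rw [h, framesF_eq_alt n hn]
  · have h0 : n.toNat = 0 := by omega
    rw [h0]
    rw [PySem.List.pyRange_one_eq_nil (by norm_num)]
    rw [alt_eq_map]
    rw [max_eq_right (by omega : n ≤ 1)]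
    rw [PySem.List.pyRange_one_cons (by norm_num : (0 : Int) < 1)]
    rw [PySem.List.pyRange_one_eq_nil (by norm_num : (1 : Int) ≤ 0 + 1)]
    simp [rowB, PySem.List.pyRange_one_eq_nil (by omega : n ≤ 0)]
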